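-- pv_equiv track=rewrite | github.com/pypi-data/pypi-mirror-267 | packages/kolibri-light/kolibri_light-0.3.1-py3-none-any.whl/kolibri/features/text/feature_functions.py | count_punc
-- ===== SOURCE A (Python) =====
-- from string import punctuation
--
-- def count_punc(line, text=None, **Kwargs):
--     """
--     Count the number of punctuations within the line.
--
--     Parameters
--     ----------
--     line : str
--         piece of line to analyze
--     Returns
--     -------
--     integer
--         the number of punctuations
--     Examples
--     --------
--     >>> count_punc("Hello, World!")
--     2
--     >>> count_punc("Hello World")
--     0
--     """
--     if not isinstance(line, str):
--         raise TypeError("'line' should be of type 'String'")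
--     count = 0
--     for ch in line:
--         if ch in punctuation:
--             count += 1
--     return count
-- ===== SOURCE B (Python) =====
-- from string import punctuation
--
-- def count_punc(line, text=None, **Kwargs):
--     if not isinstance(line, str):
--         raise TypeError("'line' should be of type 'String'")
--     freq = {}
--     for ch in line:
--         freq[ch] = freq.get(ch, 0) + 1
--     count = 0
--     for p in punctuation:
--         count += freq.get(p, 0)
--     return count
-- ===== Notes on version B (the rewrite author's own statement) =====
-- stated objective: alternative
-- what changed: B builds a frequency table of the line in one pass and then sums the tallies of the 32 fixed punctuation characters, instead of testing each character of the line for membership in the punctuation string.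
import Mathlib
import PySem

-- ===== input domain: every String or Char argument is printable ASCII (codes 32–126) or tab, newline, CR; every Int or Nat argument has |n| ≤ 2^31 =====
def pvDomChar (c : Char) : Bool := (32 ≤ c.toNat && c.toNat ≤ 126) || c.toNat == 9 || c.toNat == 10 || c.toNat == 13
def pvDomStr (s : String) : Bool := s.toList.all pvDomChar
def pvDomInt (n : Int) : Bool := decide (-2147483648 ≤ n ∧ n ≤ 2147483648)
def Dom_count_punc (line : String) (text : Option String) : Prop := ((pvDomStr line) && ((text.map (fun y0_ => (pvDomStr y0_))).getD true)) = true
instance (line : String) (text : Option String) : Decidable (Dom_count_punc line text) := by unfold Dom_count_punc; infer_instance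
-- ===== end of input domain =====

-- B builds a one-pass frequency table of the line and sums the tallies of the 32 punctuation
-- characters, instead of testing each character of the line for membership in the punctuation string.


-- string.punctuation
def pvPunct : List Char := "!\"#$%&'()*+,-./:;<=>?@[\\]^_`{|}~".toList

-- ===== PORT A =====
-- for ch in line: if ch in punctuation: count += 1
-- ('ch in punctuation' for a single character ch is exactly character membership)
def count_punc (line : String) (text : Option String) : Int :=
  line.toList.foldl (fun count ch => if pvPunct.contains ch then count + 1 else count) 0

-- ===== PORT B =====
-- freq[ch] = freq.get(ch, 0) + 1 over the line, then sum freq.get(p, 0) over punctuation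
def count_punc_alt (line : String) (text : Option String) : Int :=
  let freq := line.toList.foldl (fun d ch => d.insert ch (d.getD ch 0 + 1)) PySem.Dict.empty
  pvPunct.foldl (fun count p => count + freq.getD p 0) 0

-- ===== PRECONDITION & SPEC =====
def Spec_count_punc (line : String) (text : Option String) (out : Int) : Prop := out = count_punc_alt line text
instance (line : String) (text : Option String) (out : Int) : Decidable (Spec_count_punc line text out) := by unfold Spec_count_punc; infer_instance

-- ===== CLAIM (what is proved, stated in full; the proofs are below) =====
def Claim_equal_count_punc : Prop := ∀ (line : String) (text : Option String), Dom_count_punc line text → Spec_count_punc line text (count_punc line text)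

-- ===== LEMMAS AND PROOFS =====

-- splitting off the head of a duplicate-free alphabet splits the membership count
lemma countP_contains_cons (p : Char) (P l : List Char) (hp : p ∉ P) :
    l.countP (fun ch => (p :: P).contains ch) = l.count p + l.countP (fun ch => P.contains ch) := by
  induction l with
  | nil => simp
  | cons c l ihl =>
    simp only [List.contains_cons] at ihl ⊢
    simp only [List.countP_cons, List.count_cons]
    rw [ihl]
    by_cases hc : c = p
    · subst hc; simp [hp]; omega
    · by_cases h2 : c ∈ P <;> simp [hc, h2] <;> omega

-- summing per-character tallies over a duplicate-free alphabet P counts the members of P in l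
lemma sum_count_eq_countP (P l : List Char) (h : P.Nodup) :
    (P.map (fun p => (l.count p : Int))).sum = (l.countP (fun ch => P.contains ch) : Int) := by
  induction P with
  | nil => simp
  | cons p P ih =>
    rcases List.nodup_cons.mp h with ⟨hp, hP⟩
    rw [List.map_cons, List.sum_cons, ih hP, countP_contains_cons p P l hp]
    push_cast
    ring

theorem count_punc_spec : Claim_equal_count_punc := by
  intro line text _
  unfold Spec_count_punc count_punc count_punc_alt
  rw [PySem.List.foldl_if_add_one, PySem.List.foldl_add]
  simp only [PySem.Dict.getD_foldl_insert_add_one, PySem.Dict.getD_empty, zero_add]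
  rw [sum_count_eq_countP pvPunct line.toList (by decide)]
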